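-- pv_equiv track=rewrite | github.com/Magenta195/programmers | LV2/방금그곡.py | solution
-- ===== SOURCE A (Python) =====
-- replace_dict = { 'C#' : 'H', 'D#' : 'I', 'F#' : 'J', 'G#' : 'K', 'A#' : 'L'}
--
-- def replace_sharp(code):
--     for key, val in replace_dict.items() :
--         code = code.replace(key, val)
--     return code
--
-- def find_start_and_interval(start, end):
--     start_h, start_m = map(int, start.split(':'))
--     start_m = start_h*60 + start_m
--     end_h, end_m = map(int, end.split(':'))
--     end_m = end_h*60 + end_m
--
--     return start_m, end_m - start_m
--
-- def find_code_infos(start, end, code):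
--     code_length = len(code)
--     start_m, interval = find_start_and_interval(start, end)
--     iter_num, left_length = interval // code_length, interval % code_length
--     code = iter_num * code + code[:left_length]
--     return start_m, interval, code
--
-- def solution(m, musicinfos):
--     answer = '(None)'
--     music_list = []
--     m = replace_sharp(m)
--
--     for musicinfo in musicinfos :
--         start, end, title, code = musicinfo.split(',')
--         code = replace_sharp(code)
--         start_m, interval, code = find_code_infos(start, end, code)
--
--         music_list.append((interval, start_m, title, code))
--
--     music_list.sort(key=lambda x : (-x[0], x[1]))
--
--     for _, _, title, code in music_list :
--         if m in code :
--             answer = title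
--             break
--
--     return answer
-- ===== SOURCE B (Python) =====
-- REPLACEMENTS = [('C#', 'H'), ('D#', 'I'), ('F#', 'J'), ('G#', 'K'), ('A#', 'L')]
--
--
-- def _clean(s):
--     for old, new in REPLACEMENTS:
--         s = s.replace(old, new)
--     return s
--
--
-- def _minutes(t):
--     h, mm = t.split(':')
--     return int(h) * 60 + int(mm)
--
--
-- def solution(m, musicinfos):
--     m = _clean(m)
--     best = None  # (interval, start, title); replaced only on a strictly better key
--     for info in musicinfos:
--         start, end, title, code = info.split(',')
--         code = _clean(code)
--         s = _minutes(start)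
--         interval = _minutes(end) - s
--         played = code * (interval // len(code)) + code[:interval % len(code)]
--         if m in played and (best is None or (interval, -s) > (best[0], -best[1])):
--             best = (interval, s, title)
--     return '(None)' if best is None else best[2]
-- ===== Notes on version B (the rewrite author's own statement) =====
-- stated objective: simpler
-- what changed: Replaced A's collect-all-tuples, stable sort by (-interval, start), then scan-for-first-match with a single pass that keeps a running best (interval, start, title), updated only on a strictly better key, so no intermediate list or sort is needed.
import Mathlib
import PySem

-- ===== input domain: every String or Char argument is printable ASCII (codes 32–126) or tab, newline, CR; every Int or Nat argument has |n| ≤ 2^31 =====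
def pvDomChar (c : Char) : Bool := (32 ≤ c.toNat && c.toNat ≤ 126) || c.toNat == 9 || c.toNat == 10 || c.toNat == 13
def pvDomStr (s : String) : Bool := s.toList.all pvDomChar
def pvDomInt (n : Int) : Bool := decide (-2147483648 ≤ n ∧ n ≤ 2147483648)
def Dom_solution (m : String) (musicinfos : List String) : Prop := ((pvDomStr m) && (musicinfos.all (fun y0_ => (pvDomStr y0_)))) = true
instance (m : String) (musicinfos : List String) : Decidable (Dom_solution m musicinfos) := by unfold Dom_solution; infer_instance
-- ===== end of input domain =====

-- B replaces A's collect-all / stable-sort / scan-for-first-match by a single pass that keeps a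
-- running best (interval, start, title), updated only on a strictly better key (objective: simpler).

-- ===== PORT A =====
def replDict : List (String × String) := [("C#", "H"), ("D#", "I"), ("F#", "J"), ("G#", "K"), ("A#", "L")]

def replaceSharp (code : String) : String :=
  replDict.foldl (fun c kv => PySem.Str.replace c kv.1 kv.2) code

-- start_h, start_m = map(int, start.split(':')) …  (none where Python raises; excluded by Pre_)
def findStartAndInterval? (start end_ : String) : Option (Int × Int) :=
  match PySem.Str.split? start ":" with
  | some [sh, sm] =>
    match PySem.Int.ofStr? sh, PySem.Int.ofStr? sm with
    | some sh, some sm =>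
      let startM := sh * 60 + sm
      match PySem.Str.split? end_ ":" with
      | some [eh, em] =>
        match PySem.Int.ofStr? eh, PySem.Int.ofStr? em with
        | some eh, some em => some (startM, (eh * 60 + em) - startM)
        | _, _ => none
      | _ => none
    | _, _ => none
  | _ => none

-- iter_num, left_length = interval // len, interval % len; code = iter_num*code + code[:left_length]
def findCodeInfos? (start end_ : String) (code : String) : Option (Int × Int × List Char) :=
  let cs := code.toList
  let codeLength : Int := (PySem.Str.len code : Int)
  match findStartAndInterval? start end_ with
  | some (startM, interval) =>
    if codeLength = 0 then none  -- ZeroDivisionError in Python; excluded by Pre_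
    else
      let iterNum := PySem.Int.floordiv interval codeLength
      let leftLength := PySem.Int.mod interval codeLength
      some (startM, interval, List.flatten (List.replicate iterNum.toNat cs) ++ PySem.List.slice cs none (some leftLength))
  | none => none

-- 'for … : if m in code : answer = title; break'
def scanA (mC : List Char) (answer : String) : List (Int × Int × String × List Char) → String
  | [] => answer
  | t :: rest => if PySem.Chars.isIn mC t.2.2.2 then t.2.2.1 else scanA mC answer rest

def solution (m : String) (musicinfos : List String) : String :=
  let answer := "(None)"
  let mC := (replaceSharp m).toList
  let musicList := musicinfos.foldl (fun acc musicinfo =>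
    match PySem.Str.split? musicinfo "," with
    | some [start, end_, title, code] =>
      match findCodeInfos? start end_ (replaceSharp code) with
      | some (startM, interval, codeL) => acc ++ [(interval, startM, title, codeL)]
      | none => acc
    | _ => acc) []
  let sortedList := PySem.List.sorted2 musicList (fun x => -x.1) (fun x => x.2.1)
  scanA mC answer sortedList

-- ===== PORT B =====
def cleanB (s : String) : String :=
  PySem.Str.replace (PySem.Str.replace (PySem.Str.replace (PySem.Str.replace
    (PySem.Str.replace s "C#" "H") "D#" "I") "F#" "J") "G#" "K") "A#" "L"

-- h, mm = t.split(':'); int(h)*60 + int(mm)   (none where Python raises; excluded by Pre_)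
def minutesB? (t : String) : Option Int :=
  match PySem.Str.split? t ":" with
  | some [h, mm] => do
      let a ← PySem.Int.ofStr? h
      let b ← PySem.Int.ofStr? mm
      pure (a * 60 + b)
  | _ => none

-- one iteration of B's loop over musicinfos, carrying the best (interval, start, title)
def stepB (mC : List Char) (best : Option (Int × Int × String)) (info : String) : Option (Int × Int × String) :=
  match PySem.Str.split? info "," with
  | some [start, end_, title, code] =>
    let cs := (cleanB code).toList
    let L : Int := (PySem.Str.len (cleanB code) : Int)
    match minutesB? start, minutesB? end_ with
    | some s, some e =>
      if L = 0 then best  -- ZeroDivisionError in Python; excluded by Pre_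
      else
        let interval := e - s
        let played := List.flatten (List.replicate (PySem.Int.floordiv interval L).toNat cs)
                        ++ PySem.List.slice cs none (some (PySem.Int.mod interval L))
        if PySem.Chars.isIn mC played &&
           (match best with
            | none => true
            | some b => decide (interval > b.1) || (!decide (interval < b.1) && decide (-s > -b.2.1)))
        then some (interval, s, title) else best
    | _, _ => best
  | _ => best

def solution_alt (m : String) (musicinfos : List String) : String :=
  let mC := (cleanB m).toList
  match musicinfos.foldl (stepB mC) none with
  | none => "(None)"
  | some b => b.2.2

-- ===== PRECONDITION & SPEC =====
-- Pre_ excludes exactly the inputs where Python A raises: a musicinfo that does not split on ','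
-- into exactly 4 fields (ValueError), a time field that is not 'int:int' (ValueError), or an
-- empty melody code (ZeroDivisionError in interval % len(code)).
def preTime (t : String) : Bool :=
  match PySem.Str.split? t ":" with
  | some [h, mm] => (PySem.Int.ofStr? h).isSome && (PySem.Int.ofStr? mm).isSome
  | _ => false

def preInfo (info : String) : Bool :=
  match PySem.Str.split? info "," with
  | some [start, end_, _, code] => preTime start && preTime end_ && !(code == "")
  | _ => false

def Pre_solution (m : String) (musicinfos : List String) : Prop :=
  musicinfos.all preInfo = true
instance (m : String) (musicinfos : List String) : Decidable (Pre_solution m musicinfos) := by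
  unfold Pre_solution; infer_instance

def pvWitness_solution : String × List String := ("ABC", ["10:00,10:03,HELLO,ABCDEF"])

def Spec_solution (m : String) (musicinfos : List String) (out : String) : Prop := out = solution_alt m musicinfos
instance (m : String) (musicinfos : List String) (out : String) : Decidable (Spec_solution m musicinfos out) := by unfold Spec_solution; infer_instance

-- ===== CLAIM (what is proved, stated in full; the proofs are below) =====
def Claim_equal_solution : Prop := ∀ (m : String) (musicinfos : List String), Dom_solution m musicinfos → Pre_solution m musicinfos → Spec_solution m musicinfos (solution m musicinfos)

-- ===== LEMMAS AND PROOFS =====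

-- the strict 'before' relation of Python's sort under key (k1 x, k2 x) (as in PySem.List.sorted2)
def pvLt {α : Type} (k1 k2 : α → Int) (a b : α) : Bool :=
  decide (k1 a < k1 b) || (!decide (k1 b < k1 a) && decide (k2 a < k2 b))

theorem pvLt_trans_notl {α : Type} (k1 k2 : α → Int) {x y z : α}
    (h1 : pvLt k1 k2 x y = true) (h2 : pvLt k1 k2 z y = false) : pvLt k1 k2 x z = true := by
  simp only [pvLt, Bool.or_eq_true, Bool.and_eq_true, Bool.not_eq_true', Bool.or_eq_false_iff,
    Bool.and_eq_false_iff, Bool.not_eq_false', decide_eq_true_eq, decide_eq_false_iff_not] at *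
  omega

theorem pvLt_asymm {α : Type} (k1 k2 : α → Int) {x y : α}
    (h : pvLt k1 k2 x y = true) : pvLt k1 k2 y x = false := by
  simp only [pvLt, Bool.or_eq_true, Bool.and_eq_true, Bool.not_eq_true', Bool.or_eq_false_iff,
    Bool.and_eq_false_iff, Bool.not_eq_false', decide_eq_true_eq, decide_eq_false_iff_not] at *
  omega

-- insertion keeps the list sorted (no earlier element strictly after a later one)
theorem insertBy_pairwise {α : Type} (k1 k2 : α → Int) (x : α) (s : List α)
    (hs : s.Pairwise (fun a b => pvLt k1 k2 b a = false)) :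
    (PySem.List.insertBy (pvLt k1 k2) x s).Pairwise (fun a b => pvLt k1 k2 b a = false) := by
  induction s with
  | nil => simp [PySem.List.insertBy]
  | cons y ys ih =>
    rw [List.pairwise_cons] at hs
    by_cases h : pvLt k1 k2 x y = true
    · rw [PySem.List.insertBy, if_pos h]
      refine List.Pairwise.cons ?_ (List.Pairwise.cons hs.1 hs.2)
      intro z hz
      rcases List.mem_cons.mp hz with rfl | hz
      · exact pvLt_asymm k1 k2 h
      · exact pvLt_asymm k1 k2 (pvLt_trans_notl k1 k2 h (hs.1 z hz))
    · rw [PySem.List.insertBy, if_neg h]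
      refine List.Pairwise.cons ?_ (ih hs.2)
      intro z hz
      rcases (PySem.List.mem_insertBy (pvLt k1 k2) x z ys).mp hz with rfl | hz
      · exact Bool.eq_false_iff.mpr h
      · exact hs.1 z hz

-- first match in an insertion = best-of (first match in the list, the new element)
theorem find?_insertBy {α : Type} (k1 k2 : α → Int) (P : α → Bool) (x : α) (s : List α)
    (hs : s.Pairwise (fun a b => pvLt k1 k2 b a = false)) :
    (PySem.List.insertBy (pvLt k1 k2) x s).find? P =
      (if P x then
        match s.find? P with
        | none => some x
        | some y => if pvLt k1 k2 x y then some x else some y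
       else s.find? P) := by
  induction s with
  | nil => simp [PySem.List.insertBy, List.find?]
  | cons y ys ih =>
    rw [List.pairwise_cons] at hs
    by_cases h : pvLt k1 k2 x y = true
    · rw [PySem.List.insertBy, if_pos h]
      by_cases hx : P x = true
      · simp only [List.find?, hx, if_pos hx]
        by_cases hy : P y = true
        · simp [hy, h]
        · simp only [Bool.not_eq_true] at hy
          simp only [hy]
          cases hfind : ys.find? P with
          | none => simp
          | some z =>
            have hz : z ∈ ys := List.mem_of_find?_eq_some hfind
            have : pvLt k1 k2 x z = true := pvLt_trans_notl k1 k2 h (hs.1 z hz)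
            simp [this]
      · simp only [Bool.not_eq_true] at hx
        simp [List.find?, hx]
    · rw [PySem.List.insertBy, if_neg h]
      have h' : pvLt k1 k2 x y = false := Bool.eq_false_iff.mpr h
      by_cases hy : P y = true
      · simp [List.find?, hy, h']
      · simp only [Bool.not_eq_true] at hy
        simp only [List.find?, hy]
        exact ih hs.2

-- generic update step of the running best
def pvUpd {α : Type} (k1 k2 : α → Int) (P : α → Bool) (b : Option α) (x : α) : Option α :=
  if P x then
    match b with
    | none => some x
    | some y => if pvLt k1 k2 x y then some x else b
  else b

-- first match of the insertion sort = fold of the running best over the original list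
theorem find?_foldl_insertBy {α : Type} (k1 k2 : α → Int) (P : α → Bool) (l : List α) :
    (l.foldl (fun acc x => PySem.List.insertBy (pvLt k1 k2) x acc) []).Pairwise
        (fun a b => pvLt k1 k2 b a = false) ∧
    (l.foldl (fun acc x => PySem.List.insertBy (pvLt k1 k2) x acc) []).find? P =
      l.foldl (pvUpd k1 k2 P) none := by
  induction l using List.reverseRecOn with
  | nil => simp
  | append_singleton l x ih =>
    rw [List.foldl_append, List.foldl_append]
    refine ⟨insertBy_pairwise k1 k2 x _ ih.1, ?_⟩
    rw [List.foldl_cons, List.foldl_nil, List.foldl_cons, List.foldl_nil,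
      find?_insertBy k1 k2 P x _ ih.1, ih.2]
    cases hf : l.foldl (pvUpd k1 k2 P) none <;> simp [pvUpd, hf]

-- ---- relating the two ports' per-song processing ----

-- the (interval, start, title, played-code) tuple A appends for one musicinfo
def processed? (info : String) : Option (Int × Int × String × List Char) :=
  match PySem.Str.split? info "," with
  | some [start, end_, title, code] =>
    (findCodeInfos? start end_ (replaceSharp code)).map (fun r => (r.2.1, r.1, title, r.2.2))
  | _ => none

theorem cleanB_eq (s : String) : cleanB s = replaceSharp s := rfl

theorem fsai_eq (s e : String) :
    findStartAndInterval? s e =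
      match minutesB? s, minutesB? e with
      | some a, some b => some (a, b - a)
      | _, _ => none := by
  unfold findStartAndInterval? minutesB?
  rcases PySem.Str.split? s ":" with _ | ⟨_ | ⟨h1, _ | ⟨m1, _ | _⟩⟩⟩ <;>
    simp <;>
    rcases PySem.Int.ofStr? h1 with _ | a <;> simp <;>
    rcases PySem.Int.ofStr? m1 with _ | b <;> simp <;>
    rcases PySem.Str.split? e ":" with _ | ⟨_ | ⟨h2, _ | ⟨m2, _ | _⟩⟩⟩ <;> simp <;>
    rcases PySem.Int.ofStr? h2 with _ | c <;> simp <;>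
    rcases PySem.Int.ofStr? m2 with _ | d <;> simp

-- B's Python comparison '(interval, -s) > (best0, -best1)' is the sort's strict 'before'
theorem better_eq_pvLt (t y : Int × Int × String × List Char) :
    (decide (t.1 > y.1) || (!decide (t.1 < y.1) && decide (-t.2.1 > -y.2.1))) =
      pvLt (fun x : Int × Int × String × List Char => -x.1) (fun x => x.2.1) t y := by
  simp only [pvLt, gt_iff_lt, ← decide_not, ← Bool.decide_and, ← Bool.decide_or,
    decide_eq_decide]
  omega

-- one B step, seen through processed?
theorem stepB_eq (mC : List Char) (b : Option (Int × Int × String)) (info : String) :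
    stepB mC b info =
      match processed? info with
      | none => b
      | some t =>
        if PySem.Chars.isIn mC t.2.2.2 &&
             (match b with
              | none => true
              | some y => decide (t.1 > y.1) || (!decide (t.1 < y.1) && decide (-t.2.1 > -y.2.1)))
        then some (t.1, t.2.1, t.2.2.1) else b := by
  unfold stepB processed?
  rcases PySem.Str.split? info "," with _ | ⟨_ | ⟨s, _ | ⟨e, _ | ⟨ti, _ | ⟨c, _ | ⟨x, xs⟩⟩⟩⟩⟩⟩
  · rfl
  · rfl
  · rfl
  · rfl
  · rfl
  · unfold findCodeInfos?
    simp only [cleanB_eq, fsai_eq]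
    rcases minutesB? s with _ | a
    · rcases minutesB? e with _ | b'
      · rfl
      · rfl
    · rcases minutesB? e with _ | b'
      · rfl
      · by_cases hL : (PySem.Str.len (replaceSharp c) : Int) = 0
        · simp only [if_pos hL, Option.map_none]
        · simp only [if_neg hL, Option.map_some]
          rfl
  · rfl

-- A's per-iteration append, seen through processed?
theorem buildA_eq (infos : List String) (acc : List (Int × Int × String × List Char)) :
    infos.foldl (fun acc musicinfo =>
      match PySem.Str.split? musicinfo "," with
      | some [start, end_, title, code] =>
        match findCodeInfos? start end_ (replaceSharp code) with
        | some (startM, interval, codeL) => acc ++ [(interval, startM, title, codeL)]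
        | none => acc
      | _ => acc) acc = acc ++ infos.filterMap processed? := by
  induction infos generalizing acc with
  | nil => simp
  | cons info rest ih =>
    rw [List.foldl_cons, List.filterMap_cons]
    have hstep : ∀ acc' : List (Int × Int × String × List Char),
        (match PySem.Str.split? info "," with
          | some [start, end_, title, code] =>
            match findCodeInfos? start end_ (replaceSharp code) with
            | some (startM, interval, codeL) => acc' ++ [(interval, startM, title, codeL)]
            | none => acc'
          | _ => acc') = acc' ++ (processed? info).toList := by
      intro acc'
      unfold processed?
      rcases PySem.Str.split? info "," with _ | ⟨_ | ⟨s, _ | ⟨e, _ | ⟨ti, _ | ⟨c, _ | _⟩⟩⟩⟩⟩ <;> simp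
      rcases findCodeInfos? s e (replaceSharp c) with _ | ⟨st, iv, cl⟩ <;> simp
    rw [hstep]
    cases h : processed? info with
    | none => simp [h, ih]
    | some t => simp [h, ih, List.append_assoc]

-- A's scan-with-break = find?
theorem scanA_eq (mC : List Char) (l : List (Int × Int × String × List Char)) :
    scanA mC "(None)" l =
      match l.find? (fun t => PySem.Chars.isIn mC t.2.2.2) with
      | none => "(None)"
      | some t => t.2.2.1 := by
  induction l with
  | nil => rfl
  | cons t rest ih =>
    rw [scanA, List.find?]
    by_cases h : PySem.Chars.isIn mC t.2.2.2 = true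
    · simp [h]
    · simp only [Bool.not_eq_true] at h
      simp [h, ih]

def pvProj (t : Int × Int × String × List Char) : Int × Int × String := (t.1, t.2.1, t.2.2.1)

-- B's triple-valued fold is the projection of the generic tuple-valued fold
theorem foldB_eq (mC : List Char) (l : List (Int × Int × String × List Char))
    (b : Option (Int × Int × String × List Char)) :
    l.foldl (fun b3 t =>
        if PySem.Chars.isIn mC t.2.2.2 &&
             (match b3 with
              | none => true
              | some y => decide (t.1 > y.1) || (!decide (t.1 < y.1) && decide (-t.2.1 > -y.2.1)))
        then some (t.1, t.2.1, t.2.2.1) else b3) (b.map pvProj) =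
      (l.foldl (pvUpd (fun x => -x.1) (fun x => x.2.1) (fun t => PySem.Chars.isIn mC t.2.2.2)) b).map pvProj := by
  induction l generalizing b with
  | nil => rfl
  | cons t rest ih =>
    rw [List.foldl_cons, List.foldl_cons]
    have hstep :
        (if PySem.Chars.isIn mC t.2.2.2 &&
             (match b.map pvProj with
              | none => true
              | some y => decide (t.1 > y.1) || (!decide (t.1 < y.1) && decide (-t.2.1 > -y.2.1)))
          then some (t.1, t.2.1, t.2.2.1) else b.map pvProj) =
          (pvUpd (fun x => -x.1) (fun x => x.2.1) (fun t => PySem.Chars.isIn mC t.2.2.2) b t).map pvProj := by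
      unfold pvUpd
      cases b with
      | none =>
        by_cases hP : PySem.Chars.isIn mC t.2.2.2 = true <;> simp [hP, pvProj]
      | some y =>
        simp only [Option.map_some]
        by_cases hP : PySem.Chars.isIn mC t.2.2.2 = true
        · simp only [hP, Bool.true_and]
          rw [show (decide (t.1 > (pvProj y).1) ||
                (!decide (t.1 < (pvProj y).1) && decide (-t.2.1 > -(pvProj y).2.1))) =
              pvLt (fun x : Int × Int × String × List Char => -x.1) (fun x => x.2.1) t y from
            better_eq_pvLt t y]
          by_cases hlt : pvLt (fun x : Int × Int × String × List Char => -x.1) (fun x => x.2.1) t y = true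
          · simp [hlt, pvProj]
          · simp [hlt, pvProj]
        · simp only [Bool.not_eq_true] at hP
          simp [hP]
    rw [hstep, ih]

-- the comparison B makes against the stored triple equals the one against the full tuple
theorem solution_alt_closed (m : String) (musicinfos : List String) :
    solution_alt m musicinfos =
      (match (musicinfos.filterMap processed?).foldl
          (pvUpd (fun x => -x.1) (fun x => x.2.1)
            (fun t => PySem.Chars.isIn ((replaceSharp m).toList) t.2.2.2)) none with
        | none => "(None)"
        | some t => t.2.2.1) := by
  simp only [solution_alt, cleanB_eq]
  have h1 : musicinfos.foldl (stepB ((replaceSharp m).toList)) none =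
      (musicinfos.filterMap processed?).foldl (fun b3 t =>
        if PySem.Chars.isIn ((replaceSharp m).toList) t.2.2.2 &&
             (match b3 with
              | none => true
              | some y => decide (t.1 > y.1) || (!decide (t.1 < y.1) && decide (-t.2.1 > -y.2.1)))
        then some (t.1, t.2.1, t.2.2.1) else b3) none := by
    generalize hb : (none : Option (Int × Int × String)) = b0
    clear hb
    induction musicinfos generalizing b0 with
    | nil => rfl
    | cons info rest ih =>
      rw [List.foldl_cons, List.filterMap_cons, stepB_eq]
      cases h : processed? info with
      | none => simp [ih]
      | some t => simp [ih]
  rw [h1]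
  have h2 := foldB_eq ((replaceSharp m).toList) (musicinfos.filterMap processed?) none
  simp only [Option.map_none] at h2
  rw [h2]
  cases (musicinfos.filterMap processed?).foldl
      (pvUpd (fun x => -x.1) (fun x => x.2.1)
        (fun t => PySem.Chars.isIn ((replaceSharp m).toList) t.2.2.2)) none with
  | none => rfl
  | some t => rfl

theorem sorted2_eq_foldl (xs : List (Int × Int × String × List Char)) :
    PySem.List.sorted2 xs (fun x => -x.1) (fun x => x.2.1) =
      xs.foldl (fun acc x =>
        PySem.List.insertBy (pvLt (fun x : Int × Int × String × List Char => -x.1) (fun x => x.2.1)) x acc) [] := rfl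

-- ===== VERDICT (by name: the statement is the Claim_ definition above) =====
theorem solution_spec : Claim_equal_solution := by
  intro m musicinfos _ _
  simp only [Spec_solution, solution]
  rw [buildA_eq, List.nil_append, sorted2_eq_foldl, solution_alt_closed]
  rw [scanA_eq]
  rw [(find?_foldl_insertBy (fun x : Int × Int × String × List Char => -x.1) (fun x => x.2.1)
        (fun t => PySem.Chars.isIn ((replaceSharp m).toList) t.2.2.2)
        (musicinfos.filterMap processed?)).2]
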